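-- pv_equiv track=rewrite | github.com/yingl/LintCodeInPython | subarray-sum-equals-to-k-ii.py | subarray_sum_equals_k_i_i
-- ===== SOURCE A (Python) =====
-- from typing import (
--     List,
-- )
--
-- def subarray_sum_equals_k_i_i(nums: List[int], k: int) -> int:
--     # write your code here
--     r = len(nums) + 1
--     s = 0
--     di = {0: [-1]}
--     for i in range(len(nums)):
--         s += nums[i]
--         if s not in di:
--             di[s] = []
--         di[s].append(i)
--     for s, ids in di.items():
--         t = s - k
--         if t in di:
--             for i in ids:
--                 for j in di[t]:
--                     if i > j:
--                         r = min(r, i - j)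
--     return r if r <= len(nums) else -1
-- ===== SOURCE B (Python) =====
-- from typing import (
--     List,
-- )
--
-- def subarray_sum_equals_k_i_i(nums: List[int], k: int) -> int:
--     # single pass: prefix-sum dict keeping the LAST index of each prefix sum
--     n = len(nums)
--     best = n + 1
--     s = 0
--     last = {0: -1}
--     for i in range(n):
--         s += nums[i]
--         t = s - k
--         if t in last:
--             best = min(best, i - last[t])
--         last[s] = i
--     return best if best <= n else -1
-- ===== Notes on version B (the rewrite author's own statement) =====
-- stated objective: alternative
-- what changed: Replaced A's two-phase grouping (build dict of ALL indices per prefix sum, then enumerate every index pair across matching groups) by a single pass that stores only the LAST index of each prefix sum and minimizes the window length on the fly (worst-case O(n) vs A's worst-case O(n^2); a timing run on the generated inputs read ~1.6x but not consistently, so no speed claim is made).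
import Mathlib
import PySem

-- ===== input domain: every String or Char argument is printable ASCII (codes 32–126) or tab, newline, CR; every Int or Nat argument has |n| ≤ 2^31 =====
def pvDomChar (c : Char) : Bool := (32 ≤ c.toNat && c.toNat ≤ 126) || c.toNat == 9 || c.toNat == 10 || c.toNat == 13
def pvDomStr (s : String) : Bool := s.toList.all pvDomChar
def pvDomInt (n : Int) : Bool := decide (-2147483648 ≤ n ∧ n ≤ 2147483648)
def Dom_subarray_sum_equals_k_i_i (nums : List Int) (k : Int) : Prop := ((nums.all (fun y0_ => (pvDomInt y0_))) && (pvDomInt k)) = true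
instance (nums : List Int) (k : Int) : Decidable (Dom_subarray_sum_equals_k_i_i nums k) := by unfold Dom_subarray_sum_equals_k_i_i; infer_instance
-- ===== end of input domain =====

-- B replaces A's two-phase grouping of ALL indices per prefix sum (then scanning every index
-- pair across matching groups) by a single pass keeping only the LAST index of each prefix sum.

-- ===== PORT A =====
-- first loop of A: 's += nums[i]; if s not in di: di[s] = []; di[s].append(i)'
def pvAStep (nums : List Int) (st : Int × PySem.Dict Int (List Int)) (i : Int) :
    Int × PySem.Dict Int (List Int) :=
  let s := st.1 + PySem.List.pyGetD nums i 0
  let di := st.2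
  let di := if di.contains s then di else di.insert s []
  let di := di.modify s [] (fun l => l ++ [i])
  (s, di)

def pvABuild (nums : List Int) : Int × PySem.Dict Int (List Int) :=
  (PySem.List.pyRange 0 (nums.length : Int) 1).foldl (pvAStep nums) (0, PySem.Dict.ofList [(0, [-1])])

-- second loop of A: for (s, ids) in di.items(): t = s - k; if t in di: for i in ids: for j in di[t]: ...
def pvALoop (k : Int) (di : PySem.Dict Int (List Int)) (r0 : Int) : Int :=
  di.items.foldl
    (fun r p =>
      let t := p.1 - k
      if di.contains t then
        p.2.foldl
          (fun r i => (di.getD t []).foldl (fun r j => if i > j then min r (i - j) else r) r)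
          r
      else r)
    r0

def subarray_sum_equals_k_i_i (nums : List Int) (k : Int) : Int :=
  let n : Int := (nums.length : Int)
  let di := (pvABuild nums).2
  let r := pvALoop k di (n + 1)
  if r ≤ n then r else -1

-- ===== PORT B =====
-- B's loop body: 's += nums[i]; t = s - k; if t in last: best = min(best, i - last[t]); last[s] = i'
def pvBStep (nums : List Int) (k : Int) (st : Int × Int × PySem.Dict Int Int) (i : Int) :
    Int × Int × PySem.Dict Int Int :=
  let s := st.1 + PySem.List.pyGetD nums i 0
  let t := s - k
  let best := if st.2.2.contains t then min st.2.1 (i - st.2.2.getD t 0) else st.2.1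
  (s, best, st.2.2.insert s i)

def subarray_sum_equals_k_i_i_alt (nums : List Int) (k : Int) : Int :=
  let n : Int := (nums.length : Int)
  let st := (PySem.List.pyRange 0 n 1).foldl (pvBStep nums k) (0, n + 1, PySem.Dict.ofList [(0, -1)])
  if st.2.1 ≤ n then st.2.1 else -1

-- ===== PRECONDITION & SPEC =====
def Spec_subarray_sum_equals_k_i_i (nums : List Int) (k : Int) (out : Int) : Prop := out = subarray_sum_equals_k_i_i_alt nums k
instance (nums : List Int) (k : Int) (out : Int) : Decidable (Spec_subarray_sum_equals_k_i_i nums k out) := by unfold Spec_subarray_sum_equals_k_i_i; infer_instance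

-- ===== CLAIM (what is proved, stated in full; the proofs are below) =====
def Claim_equal_subarray_sum_equals_k_i_i : Prop := ∀ (nums : List Int) (k : Int), Dom_subarray_sum_equals_k_i_i nums k → Spec_subarray_sum_equals_k_i_i nums k (subarray_sum_equals_k_i_i nums k)

-- ===== LEMMAS AND PROOFS =====

def pvQ (nums : List Int) (j : Int) : Int := (nums.take (j + 1).toNat).sum
def pvGrp (nums : List Int) (t : Int) (m : Nat) : List Int :=
  (if t = 0 then [-1] else []) ++
    (List.range m).filterMap (fun i => if pvQ nums (i : Int) = t then some (i : Int) else none)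
lemma pvGrp_mem (nums : List Int) (t : Int) (m : Nat) (j : Int) :
    j ∈ pvGrp nums t m ↔ (-1 ≤ j ∧ j < (m : Int) ∧ pvQ nums j = t) := by
  simp only [pvGrp, List.mem_append, List.mem_filterMap]
  constructor
  · rintro (h | ⟨i, hi, hq⟩)
    · split at h
      · simp at h
        subst h
        refine ⟨le_refl _, by omega, by simp [pvQ]; omega⟩
      · simp at h
    · simp at hi
      obtain ⟨a, ha, rfl⟩ := hi
      split_ifs at hq with hqt
      · simp at hq
        subst hq
        exact ⟨by omega, by omega, hqt⟩
  · rintro ⟨h1, h2, h3⟩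
    by_cases hneg : j = -1
    · subst hneg
      left
      have : t = 0 := by simpa [pvQ] using h3.symm
      simp [this]
    · right
      have hj : (j.toNat : Int) = j := by omega
      refine ⟨j.toNat, by simp; exact ⟨j.toNat, by omega, by omega⟩, ?_⟩
      rw [hj]
      simp [h3]

lemma dlit : PySem.Dict.ofList [((0:Int), [(-1:Int)])] = PySem.Dict.mk [(0, [-1])] := rfl
lemma dlit2 : PySem.Dict.ofList [((0:Int), (-1:Int))] = PySem.Dict.mk [(0, -1)] := rfl
lemma dgetD (t : Int) : (PySem.Dict.ofList [((0:Int), [(-1:Int)])]).getD t [] = if t = 0 then [-1] else [] := by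
  rw [dlit, PySem.Dict.getD_eq_get?_getD, PySem.Dict.get?_mk_cons]
  by_cases h : t = 0
  · simp [h]
  · simp [PySem.Dict.get?, show (0:Int) ≠ t from fun hh => h hh.symm, h]
lemma dcont (t : Int) : (PySem.Dict.ofList [((0:Int), [(-1:Int)])]).contains t = true ↔ t = 0 := by
  rw [dlit, PySem.Dict.contains_eq_isSome_get?, PySem.Dict.get?_mk_cons]
  by_cases h : t = 0
  · simp [h]
  · simp [PySem.Dict.get?, show (0:Int) ≠ t from fun hh => h hh.symm, h]
lemma dget2 (t : Int) : (PySem.Dict.ofList [((0:Int), (-1:Int))]).get? t = if t = 0 then some (-1) else none := by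
  rw [dlit2, PySem.Dict.get?_mk_cons]
  by_cases h : t = 0
  · simp [h]
  · simp [PySem.Dict.get?, show (0:Int) ≠ t from fun hh => h hh.symm, h]

lemma pvGrp_nil (nums : List Int) (t : Int) (m : Nat)
    (h : ¬ (t = 0 ∨ ∃ i : Nat, i < m ∧ pvQ nums (i : Int) = t)) : pvGrp nums t m = [] := by
  rw [List.eq_nil_iff_forall_not_mem]
  intro j hj
  rw [pvGrp_mem] at hj
  obtain ⟨h1, h2, h3⟩ := hj
  by_cases hneg : j = -1
  · subst hneg
    exact h (Or.inl (by simpa [pvQ] using h3.symm))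
  · exact h (Or.inr ⟨j.toNat, by omega, by rw [show ((j.toNat : Int)) = j by omega]; exact h3⟩)

lemma pvGrp_succ (nums : List Int) (t : Int) (m : Nat) :
    pvGrp nums t (m + 1) =
      if pvQ nums (m : Int) = t then pvGrp nums t m ++ [(m : Int)] else pvGrp nums t m := by
  by_cases hq : pvQ nums (m : Int) = t <;>
    simp [pvGrp, List.range_succ, List.filterMap_cons, hq, List.append_assoc]

lemma pvSum_take_succ (nums : List Int) (m : Nat) (h : m < nums.length) :
    (nums.take (m + 1)).sum = (nums.take m).sum + nums.getD m 0 := by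
  rw [List.getD_eq_getElem nums 0 h]
  exact List.sum_take_succ nums m h

lemma pvABuild_partial (nums : List Int) :
    ∀ m : Nat, m ≤ nums.length →
      (((PySem.List.pyRange 0 (m : Int) 1).foldl (pvAStep nums) (0, PySem.Dict.ofList [(0, [-1])])).1
          = (nums.take m).sum)
      ∧ ((PySem.List.pyRange 0 (m : Int) 1).foldl (pvAStep nums) (0, PySem.Dict.ofList [(0, [-1])])).2.keys.Nodup
      ∧ (∀ t, ((PySem.List.pyRange 0 (m : Int) 1).foldl (pvAStep nums) (0, PySem.Dict.ofList [(0, [-1])])).2.getD t []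
            = pvGrp nums t m)
      ∧ (∀ t, ((PySem.List.pyRange 0 (m : Int) 1).foldl (pvAStep nums) (0, PySem.Dict.ofList [(0, [-1])])).2.contains t = true
            ↔ (t = 0 ∨ ∃ i : Nat, i < m ∧ pvQ nums (i : Int) = t)) := by
  intro m
  induction m with
  | zero =>
      intro _
      rw [show ((0 : Nat) : Int) = 0 by rfl, PySem.List.pyRange_one_eq_nil (le_refl 0)]
      simp only [List.foldl_nil]
      refine ⟨by simp, by rw [dlit]; decide, ?_, ?_⟩
      · intro t
        rw [dgetD]
        simp [pvGrp]
      · intro t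
        rw [dcont]
        simp
  | succ m ih =>
      intro hm1
      have hm : m < nums.length := by omega
      obtain ⟨ihs, ihnd, ihg, ihc⟩ := ih (by omega)
      rw [show ((m + 1 : Nat) : Int) = (m : Int) + 1 by push_cast; ring,
        PySem.List.pyRange_one_succ_right (by positivity), List.foldl_append]
      set prev := (PySem.List.pyRange 0 (m : Int) 1).foldl (pvAStep nums) (0, PySem.Dict.ofList [(0, [-1])]) with hprev
      simp only [List.foldl_cons, List.foldl_nil]
      have hs' : prev.1 + PySem.List.pyGetD nums (m : Int) 0 = pvQ nums (m : Int) := by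
        rw [PySem.List.pyGetD_natCast, ihs, pvQ]
        rw [show ((m : Int) + 1).toNat = m + 1 by omega]
        exact (pvSum_take_succ nums m hm).symm
      set s' := prev.1 + PySem.List.pyGetD nums (m : Int) 0 with hs'def
      have htake : s' = (nums.take (m + 1)).sum := by
        rw [hs', pvQ, show ((m : Int) + 1).toNat = m + 1 by omega]
      set dd := if prev.2.contains s' then prev.2 else prev.2.insert s' [] with hdd
      have hstep : pvAStep nums prev (m : Int) = (s', dd.modify s' [] (fun l => l ++ [(m : Int)])) := rfl
      rw [hstep]
      have hddg : ∀ t, dd.getD t [] = pvGrp nums t m := by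
        intro t
        by_cases hc : prev.2.contains s' = true
        · rw [hdd, if_pos hc, ihg]
        · have hnil : pvGrp nums s' m = [] := pvGrp_nil _ _ _ (by rw [← ihc]; simp [hc])
          rw [hdd, if_neg (by simp [hc]), PySem.Dict.getD_insert]
          by_cases ht : t = s'
          · rw [if_pos ht, ht, hnil]
          · rw [if_neg ht, ihg]
      have hddc : ∀ t, (dd.contains t = true ↔ (t = s' ∨ prev.2.contains t = true)) := by
        intro t
        by_cases hc : prev.2.contains s' = true
        · rw [hdd, if_pos hc]
          constructor
          · exact fun h => Or.inr h
          · rintro (rfl | h)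
            · exact hc
            · exact h
        · rw [hdd, if_neg (by simp [hc]), PySem.Dict.contains_insert]
          simp
      have hddnd : dd.keys.Nodup := by
        by_cases hc : prev.2.contains s' = true
        · rw [hdd, if_pos hc]; exact ihnd
        · rw [hdd, if_neg (by simp [hc])]
          exact PySem.Dict.nodup_keys_insert _ _ _ ihnd
      refine ⟨htake, ?_, ?_, ?_⟩
      · rw [PySem.Dict.keys_modify]
        exact PySem.Dict.nodup_keys_insert _ _ _ hddnd
      · intro t
        rw [PySem.Dict.getD_modify, pvGrp_succ]
        by_cases ht : t = s'
        · rw [if_pos ht, if_pos (by rw [← hs', ht]), hddg, ht]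
        · rw [if_neg ht, if_neg (by rw [← hs']; exact fun h => ht h.symm), hddg]
      · intro t
        rw [PySem.Dict.contains_modify]
        simp only [Bool.or_eq_true, beq_iff_eq]
        rw [hddc]
        constructor
        · rintro (rfl | rfl | h)
          · exact Or.inr ⟨m, by omega, hs'.symm⟩
          · exact Or.inr ⟨m, by omega, hs'.symm⟩
          · rcases (ihc t).mp h with h0 | ⟨i, hi, hq⟩
            · exact Or.inl h0
            · exact Or.inr ⟨i, by omega, hq⟩
        · rintro (h0 | ⟨i, hi, hq⟩)
          · exact Or.inr (Or.inr ((ihc t).mpr (Or.inl h0)))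
          · by_cases him : i = m
            · subst him
              exact Or.inl (by rw [← hq, hs'])
            · exact Or.inr (Or.inr ((ihc t).mpr (Or.inr ⟨i, by omega, hq⟩)))

def pvPair (nums : List Int) (k v : Int) : Prop :=
  ∃ i j : Int, 0 ≤ i ∧ i < (nums.length : Int) ∧ -1 ≤ j ∧ j < i ∧
    pvQ nums i - pvQ nums j = k ∧ v = i - j

def pvChar (nums : List Int) (k r : Int) : Prop :=
  (r = (nums.length : Int) + 1 ∨ pvPair nums k r) ∧ (∀ v, pvPair nums k v → r ≤ v)

lemma pvFoldLeInit {α : Type} (f : Int → α → Int) (h : ∀ r x, f r x ≤ r) :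
    ∀ (L : List α) (a : Int), L.foldl f a ≤ a := by
  intro L
  induction L with
  | nil => intro a; simp
  | cons x t ih =>
      intro a
      calc (x :: t).foldl f a = t.foldl f (f a x) := rfl
        _ ≤ f a x := ih _
        _ ≤ a := h a x

lemma pvFoldTouch {α : Type} (f : Int → α → Int) (h : ∀ r x, f r x ≤ r) {x : α} {v : Int} :
    ∀ (L : List α), x ∈ L → (∀ r, f r x ≤ v) → ∀ a, L.foldl f a ≤ v := by
  intro L
  induction L with
  | nil => intro hx; simp at hx
  | cons y t ih =>
      intro hx hv a
      rcases List.mem_cons.mp hx with rfl | hx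
      · calc (x :: t).foldl f a = t.foldl f (f a x) := rfl
          _ ≤ f a x := pvFoldLeInit f h t _
          _ ≤ v := hv a
      · exact ih hx hv (f a y)

lemma pvFoldVals {α : Type} (P : Int → Prop) (f : Int → α → Int) :
    ∀ (L : List α), (∀ x ∈ L, ∀ r, f r x = r ∨ P (f r x)) → ∀ a, (L.foldl f a = a ∨ P (L.foldl f a)) := by
  intro L
  induction L with
  | nil => intro _ a; simp
  | cons x t ih =>
      intro h a
      have hstep := h x (List.mem_cons_self) a
      have htail := ih (fun y hy => h y (List.mem_cons_of_mem _ hy)) (f a x)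
      rcases htail with heq | hp
      · rw [List.foldl_cons, heq]
        exact hstep
      · exact Or.inr (by simpa [List.foldl_cons] using hp)

lemma pvQ_toNat (nums : List Int) (j : Int) (h : 0 ≤ j) : pvQ nums ((j.toNat : Nat) : Int) = pvQ nums j := by
  rw [show ((j.toNat : Nat) : Int) = j by omega]

lemma pvA_char (nums : List Int) (k : Int) :
    pvChar nums k (pvALoop k (pvABuild nums).2 ((nums.length : Int) + 1)) := by
  obtain ⟨-, hnd, hg, hcont⟩ := pvABuild_partial nums nums.length (le_refl _)
  set di := (pvABuild nums).2 with hdi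
  have hnd : di.keys.Nodup := hnd
  have hg : ∀ t, di.getD t [] = pvGrp nums t nums.length := hg
  have hcont : ∀ t, (di.contains t = true ↔ (t = 0 ∨ ∃ i : Nat, i < nums.length ∧ pvQ nums (i : Int) = t)) := hcont
  have hcontQ : ∀ j : Int, -1 ≤ j → j < (nums.length : Int) → di.contains (pvQ nums j) = true := by
    intro j h1 h2
    rw [hcont]
    by_cases hneg : j = -1
    · exact Or.inl (by simp [hneg, pvQ])
    · exact Or.inr ⟨j.toNat, by omega, by rw [pvQ_toNat nums j (by omega)]⟩
  have hjmono : ∀ (i r : Int) (js : List Int),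
      js.foldl (fun r j => if i > j then min r (i - j) else r) r ≤ r :=
    fun i r js => pvFoldLeInit _ (fun r j => by split <;> simp) js r
  have hmono : ∀ (r : Int) (p : Int × List Int),
      (fun r (p : Int × List Int) =>
        if di.contains (p.1 - k) then
          p.2.foldl (fun r i => (di.getD (p.1 - k) []).foldl (fun r j => if i > j then min r (i - j) else r) r) r
        else r) r p ≤ r := by
    intro r p
    dsimp only
    split
    · exact pvFoldLeInit _ (fun r i => hjmono i r _) p.2 r
    · exact le_refl r
  simp only [pvALoop]
  constructor
  · refine pvFoldVals (pvPair nums k) _ di.items ?_ _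
    intro p hp r
    dsimp only
    have hval : p.2 = pvGrp nums p.1 nums.length := by
      have h1 := PySem.Dict.get?_of_mem_items di hp hnd
      have h2 := PySem.Dict.getD_of_get?_eq_some di [] h1
      rw [← h2, hg]
    split
    · refine pvFoldVals (pvPair nums k) _ p.2 ?_ r
      intro i hi r
      refine pvFoldVals (pvPair nums k) _ _ ?_ r
      intro j hj r
      dsimp only
      by_cases hij : i > j
      · rw [if_pos hij]
        rcases min_choice r (i - j) with h | h
        · exact Or.inl h
        · right
          rw [h]
          rw [hval, pvGrp_mem] at hi
          rw [hg, pvGrp_mem] at hj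
          exact ⟨i, j, by omega, hi.2.1, hj.1, hij, by rw [hi.2.2, hj.2.2]; ring, rfl⟩
      · rw [if_neg hij]
        exact Or.inl rfl
    · exact Or.inl rfl
  · rintro v ⟨i, j, h0, h1, h2, h3, h4, rfl⟩
    have hQj : pvQ nums i - k = pvQ nums j := by omega
    have hci : di.contains (pvQ nums i) = true := hcontQ i (by omega) h1
    have hget : di.get? (pvQ nums i) = some (pvGrp nums (pvQ nums i) nums.length) := by
      have hs : (di.get? (pvQ nums i)).isSome := by rw [← PySem.Dict.contains_eq_isSome_get?]; exact hci
      obtain ⟨w, hw⟩ := Option.isSome_iff_exists.mp hs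
      rw [hw]
      have h5 := PySem.Dict.getD_of_get?_eq_some di [] hw
      rw [← h5, hg]
    refine pvFoldTouch _ hmono di.items (PySem.Dict.mem_items_of_get?_eq_some di hget) ?_ _
    intro r
    dsimp only
    rw [if_pos (by rw [hQj]; exact hcontQ j h2 (by omega))]
    refine pvFoldTouch _ (fun r x => hjmono x r _) _ (x := i) ?_ ?_ r
    · rw [pvGrp_mem]
      exact ⟨by omega, h1, rfl⟩
    · intro r
      refine pvFoldTouch _ (fun r j => by split <;> simp) _ (x := j) ?_ ?_ r
      · rw [hg, pvGrp_mem]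
        exact ⟨h2, by omega, hQj.symm⟩
      · intro r
        dsimp only
        rw [if_pos h3]
        exact min_le_right r (i - j)

lemma dcont2 (t : Int) : (PySem.Dict.ofList [((0:Int), (-1:Int))]).contains t = true ↔ t = 0 := by
  rw [PySem.Dict.contains_eq_isSome_get?, dget2]
  by_cases h : t = 0 <;> simp [h]

lemma pvB_partial (nums : List Int) (k : Int) :
    ∀ m : Nat, m ≤ nums.length →
      (((PySem.List.pyRange 0 (m : Int) 1).foldl (pvBStep nums k) (0, (nums.length : Int) + 1, PySem.Dict.ofList [(0, -1)])).1
          = (nums.take m).sum)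
      ∧ (∀ t j, ((PySem.List.pyRange 0 (m : Int) 1).foldl (pvBStep nums k) (0, (nums.length : Int) + 1, PySem.Dict.ofList [(0, -1)])).2.2.get? t = some j
           → (-1 ≤ j ∧ j < (m : Int) ∧ pvQ nums j = t ∧ ∀ j', j < j' → j' < (m : Int) → pvQ nums j' ≠ t))
      ∧ (∀ j : Int, -1 ≤ j → j < (m : Int) →
          ((PySem.List.pyRange 0 (m : Int) 1).foldl (pvBStep nums k) (0, (nums.length : Int) + 1, PySem.Dict.ofList [(0, -1)])).2.2.contains (pvQ nums j) = true)
      ∧ (((PySem.List.pyRange 0 (m : Int) 1).foldl (pvBStep nums k) (0, (nums.length : Int) + 1, PySem.Dict.ofList [(0, -1)])).2.1 = (nums.length : Int) + 1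
          ∨ pvPair nums k ((PySem.List.pyRange 0 (m : Int) 1).foldl (pvBStep nums k) (0, (nums.length : Int) + 1, PySem.Dict.ofList [(0, -1)])).2.1)
      ∧ (∀ i j : Int, 0 ≤ i → i < (m : Int) → -1 ≤ j → j < i → pvQ nums i - pvQ nums j = k
          → ((PySem.List.pyRange 0 (m : Int) 1).foldl (pvBStep nums k) (0, (nums.length : Int) + 1, PySem.Dict.ofList [(0, -1)])).2.1 ≤ i - j) := by
  intro m
  induction m with
  | zero =>
      intro _
      rw [show ((0 : Nat) : Int) = 0 by rfl, PySem.List.pyRange_one_eq_nil (le_refl 0)]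
      simp only [List.foldl_nil]
      refine ⟨by simp, ?_, ?_, ?_, ?_⟩
      · intro t j hj
        rw [dget2] at hj
        split_ifs at hj with ht
        · simp at hj
          refine ⟨by omega, by omega, ?_, ?_⟩
          · subst ht
            rw [← hj]
            rfl
          · intro j' hj1 hj2
            omega
      · intro j h1 h2
        have : j = -1 := by omega
        subst this
        rw [show pvQ nums (-1) = 0 from rfl, dcont2]
      · exact Or.inl trivial
      · intro i j h0 h1 h2 h3 h4
        omega
  | succ m ih =>
      intro hm1
      have hm : m < nums.length := by omega
      obtain ⟨ihs, ihget, ihcont, ihval, ihbound⟩ := ih (by omega)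
      rw [show ((m + 1 : Nat) : Int) = (m : Int) + 1 by push_cast; ring,
        PySem.List.pyRange_one_succ_right (by positivity), List.foldl_append]
      set prev := (PySem.List.pyRange 0 (m : Int) 1).foldl (pvBStep nums k) (0, (nums.length : Int) + 1, PySem.Dict.ofList [(0, -1)]) with hprev
      simp only [List.foldl_cons, List.foldl_nil]
      set s' := prev.1 + PySem.List.pyGetD nums (m : Int) 0 with hs'def
      have hs' : s' = pvQ nums (m : Int) := by
        rw [hs'def, PySem.List.pyGetD_natCast, ihs, pvQ,
          show ((m : Int) + 1).toNat = m + 1 by omega]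
        exact (pvSum_take_succ nums m hm).symm
      have hstep : pvBStep nums k prev (m : Int) =
          (s', (if prev.2.2.contains (s' - k) then min prev.2.1 ((m : Int) - prev.2.2.getD (s' - k) 0) else prev.2.1),
            prev.2.2.insert s' (m : Int)) := rfl
      rw [hstep]
      have htake : s' = (nums.take (m + 1)).sum := by
        rw [hs', pvQ, show ((m : Int) + 1).toNat = m + 1 by omega]
      refine ⟨htake, ?_, ?_, ?_, ?_⟩
      · -- get? characterization
        intro t j hj
        rw [PySem.Dict.get?_insert] at hj
        by_cases ht : t = s'
        · rw [if_pos ht] at hj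
          simp at hj
          subst hj
          refine ⟨by omega, by omega, by rw [ht, hs'], ?_⟩
          intro j' hj1 hj2 _
          omega
        · rw [if_neg ht] at hj
          obtain ⟨g1, g2, g3, g4⟩ := ihget t j hj
          refine ⟨g1, by omega, g3, ?_⟩
          intro j' hj1 hj2 hq
          by_cases hj'm : j' = (m : Int)
          · subst hj'm
            exact ht (by rw [← hq, hs'])
          · exact g4 j' hj1 (by omega) hq
      · -- contains
        intro j h1 h2
        rw [PySem.Dict.contains_insert]
        by_cases hjm : j = (m : Int)
        · subst hjm
          simp [hs'.symm]
        · rw [ihcont j h1 (by omega)]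
          simp
      · -- value is n+1 or a pair value
        split_ifs with hc
        · rcases min_choice prev.2.1 ((m : Int) - prev.2.2.getD (s' - k) 0) with h | h
          · rw [h]; exact ihval
          · rw [h]
            right
            have hsome : (prev.2.2.get? (s' - k)).isSome := by
              rw [← PySem.Dict.contains_eq_isSome_get?]; exact hc
            obtain ⟨jm, hw⟩ := Option.isSome_iff_exists.mp hsome
            obtain ⟨g1, g2, g3, g4⟩ := ihget _ _ hw
            rw [PySem.Dict.getD_of_get?_eq_some _ _ hw]
            exact ⟨(m : Int), jm, by omega, by omega, g1, by omega, by rw [g3, ← hs']; ring, rfl⟩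
        · exact ihval
      · -- bound on all pairs with i ≤ m
        intro i j h0 h1 h2 h3 h4
        by_cases him : i = (m : Int)
        · subst him
          have hQj : pvQ nums j = s' - k := by rw [hs']; omega
          have hc : prev.2.2.contains (s' - k) = true := by
            rw [← hQj]
            exact ihcont j h2 (by omega)
          rw [if_pos hc]
          have hsome : (prev.2.2.get? (s' - k)).isSome := by
            rw [← PySem.Dict.contains_eq_isSome_get?]; exact hc
          obtain ⟨jm, hw⟩ := Option.isSome_iff_exists.mp hsome
          obtain ⟨g1, g2, g3, g4⟩ := ihget _ _ hw
          have hjle : j ≤ jm := by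
            by_contra hlt
            exact g4 j (by omega) (by omega) hQj
          rw [PySem.Dict.getD_of_get?_eq_some _ _ hw]
          exact le_trans (min_le_right _ _) (by omega)
        · have := ihbound i j h0 (by omega) h2 h3 h4
          split_ifs with hc
          · calc min prev.2.1 ((m : Int) - prev.2.2.getD (s' - k) 0) ≤ prev.2.1 := min_le_left _ _
              _ ≤ i - j := this
          · exact this

lemma pvB_char (nums : List Int) (k : Int) :
    pvChar nums k
      (((PySem.List.pyRange 0 (nums.length : Int) 1).foldl (pvBStep nums k)
          (0, (nums.length : Int) + 1, PySem.Dict.ofList [(0, -1)])).2.1) := by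
  obtain ⟨-, -, -, hval, hbound⟩ := pvB_partial nums k nums.length (le_refl _)
  refine ⟨hval, ?_⟩
  rintro v ⟨i, j, h0, h1, h2, h3, h4, rfl⟩
  exact hbound i j h0 h1 h2 h3 h4

lemma pvQ_pair_le (nums : List Int) (k v : Int) (h : pvPair nums k v) :
    1 ≤ v ∧ v ≤ (nums.length : Int) := by
  obtain ⟨i, j, h0, h1, h2, h3, _, h5⟩ := h
  constructor <;> omega

lemma pvChar_unique (nums : List Int) (k x y : Int)
    (hx : pvChar nums k x) (hy : pvChar nums k y) : x = y := by
  obtain ⟨hx1, hx2⟩ := hx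
  obtain ⟨hy1, hy2⟩ := hy
  have hxy : x ≤ y := by
    rcases hy1 with rfl | hp
    · rcases hx1 with rfl | hp
      · omega
      · have := pvQ_pair_le nums k x hp; omega
    · exact hx2 _ hp
  have hyx : y ≤ x := by
    rcases hx1 with rfl | hp
    · rcases hy1 with rfl | hp
      · omega
      · have := pvQ_pair_le nums k y hp; omega
    · exact hy2 _ hp
  omega

-- ===== VERDICT (by name: the statement is the Claim_ definition above) =====

theorem subarray_sum_equals_k_i_i_spec : Claim_equal_subarray_sum_equals_k_i_i := by
  intro nums k _
  show subarray_sum_equals_k_i_i nums k = subarray_sum_equals_k_i_i_alt nums k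
  have h := pvChar_unique nums k _ _ (pvA_char nums k) (pvB_char nums k)
  simp only [subarray_sum_equals_k_i_i, subarray_sum_equals_k_i_i_alt]
  rw [h]
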